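-- pv_equiv track=rewrite | github.com/salfan21/python_lab_10_Novak | main.py | are_characters_hidden
-- ===== SOURCE A (Python) =====
-- def are_characters_hidden(word, combination):
--     word = word.lower()  # перетворюємо слово у нижній регістр для незалежності від регістру
--     combination = combination.lower()  # те ж саме робимо з комбінацією символів
--
--     index = -1  # починаємо з індексу -1, щоб шукати символи слова з самого початку
--     for char in word:
--         index = combination.find(char, index + 1)  # шукаємо кожен символ слова в комбінації, починаючи з наступного індексу
--
--         if index == -1:
--             return False  # якщо який-небудь символ слова не знайдено, відповідь - No
--
--     return True  # якщо всі символи слова знайдено, відповідь - Yes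
-- ===== SOURCE B (Python) =====
-- def are_characters_hidden(word, combination):
--     # Index the combination once: for each character, the sorted list of its
--     # positions; then resolve each word character by binary search for the
--     # first position >= need (classic subsequence-query index).
--     positions = {}
--     for i, ch in enumerate(combination.lower()):
--         positions.setdefault(ch, []).append(i)
--     need = 0
--     for ch in word.lower():
--         idx = positions.get(ch, [])
--         lo, hi = 0, len(idx)
--         while lo < hi:
--             mid = (lo + hi) // 2
--             if idx[mid] < need:
--                 lo = mid + 1
--             else:
--                 hi = mid
--         if lo == len(idx):
--             return False
--         need = idx[lo] + 1
--     return True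
-- ===== Notes on version B (the rewrite author's own statement) =====
-- stated objective: alternative
-- what changed: Instead of scanning with str.find and an advancing index, B first builds a dict mapping each character of combination.lower() to the sorted list of its positions, then resolves each word character by binary search for the first indexed position >= the running cursor.
import Mathlib
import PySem

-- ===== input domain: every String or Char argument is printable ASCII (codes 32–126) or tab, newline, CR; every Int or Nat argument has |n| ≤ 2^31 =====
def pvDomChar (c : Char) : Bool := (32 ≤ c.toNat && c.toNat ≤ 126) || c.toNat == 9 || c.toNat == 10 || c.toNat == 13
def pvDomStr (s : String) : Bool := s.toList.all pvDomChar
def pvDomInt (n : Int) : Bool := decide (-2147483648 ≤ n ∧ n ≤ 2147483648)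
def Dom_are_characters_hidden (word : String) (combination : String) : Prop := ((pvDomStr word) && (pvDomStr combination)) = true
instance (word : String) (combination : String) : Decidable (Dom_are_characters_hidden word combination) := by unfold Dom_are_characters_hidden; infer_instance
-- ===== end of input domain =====

-- B replaces A's advancing-index str.find scan by a per-character positions index
-- (dict char -> sorted position list) queried by binary search; same results, different algorithm.

-- ===== PORT A =====
-- A's loop: for char in word, index = combination.find(char, index + 1); return False on -1.
def pvALoop (comb : List Char) : List Char → Int → Bool
  | [], _ => true
  | c :: ws, index =>
    let i := PySem.Chars.findFrom comb [c] (index + 1) none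
    if i = -1 then false else pvALoop comb ws i

def are_characters_hidden (word : String) (combination : String) : Bool :=
  pvALoop (PySem.Chars.lower combination.toList) (PySem.Chars.lower word.toList) (-1)

-- ===== PORT B =====
-- positions.setdefault(ch, []).append(i), i.e. positions[ch] = positions.get(ch, []) + [i].
def pvBuildStep (d : PySem.Dict Char (List Int)) (p : Int × Char) : PySem.Dict Char (List Int) :=
  d.modify p.2 [] (· ++ [p.1])

-- for i, ch in enumerate(combination.lower()): ...
def pvPositions (comb : List Char) : PySem.Dict Char (List Int) :=
  (PySem.List.enumerate comb 0).foldl pvBuildStep PySem.Dict.empty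

-- the hand-written while-loop binary search (idx[mid] is in range whenever lo < hi ≤ len idx,
-- so getD is exact there)
def pvBSearch (idx : List Int) (need : Int) (lo hi : Nat) : Nat :=
  if h : lo < hi then
    let mid := (lo + hi) / 2
    if idx.getD mid 0 < need then pvBSearch idx need (mid + 1) hi
    else pvBSearch idx need lo mid
  else lo
termination_by hi - lo
decreasing_by all_goals omega

-- for ch in word.lower(): idx = positions.get(ch, []); binary search; advance need
def pvBLoop (pos : PySem.Dict Char (List Int)) : List Char → Int → Bool
  | [], _ => true
  | c :: ws, need =>
    let idx := pos.getD c []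
    let r := pvBSearch idx need 0 idx.length
    if r = idx.length then false
    else pvBLoop pos ws (idx.getD r 0 + 1)

def are_characters_hidden_alt (word : String) (combination : String) : Bool :=
  pvBLoop (pvPositions (PySem.Chars.lower combination.toList)) (PySem.Chars.lower word.toList) 0

-- ===== PRECONDITION & SPEC =====
def Spec_are_characters_hidden (word : String) (combination : String) (out : Bool) : Prop := out = are_characters_hidden_alt word combination
instance (word : String) (combination : String) (out : Bool) : Decidable (Spec_are_characters_hidden word combination out) := by unfold Spec_are_characters_hidden; infer_instance

-- ===== CLAIM (what is proved, stated in full; the proofs are below) =====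
def Claim_equal_are_characters_hidden : Prop := ∀ (word : String) (combination : String), Dom_are_characters_hidden word combination → Spec_are_characters_hidden word combination (are_characters_hidden word combination)

-- ===== LEMMAS AND PROOFS =====

-- the list of positions of c in l, counting from k (what pvPositions stores per character)
def pvOccs (c : Char) : List Char → Nat → List Int
  | [], _ => []
  | d :: l, k => if d = c then (k : Int) :: pvOccs c l (k + 1) else pvOccs c l (k + 1)

lemma pvFindGo_cons (c d : Char) (l : List Char) (i : Nat) :
    PySem.Chars.find.go [c] (d :: l) i = if c = d then (i : Int) else PySem.Chars.find.go [c] l (i + 1) := by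
  simp [PySem.Chars.find.go, List.isPrefixOf_iff_prefix]

lemma pvFindGo_nil (c : Char) (i : Nat) : PySem.Chars.find.go [c] [] i = -1 := by
  simp [PySem.Chars.find.go]

lemma pvGo_occs (c : Char) : ∀ (l : List Char) (i : Nat),
    PySem.Chars.find.go [c] l i = (pvOccs c l i).headD (-1)
  | [], i => by simp [pvFindGo_nil, pvOccs]
  | d :: l, i => by
    rw [pvFindGo_cons]
    by_cases h : c = d
    · simp [pvOccs, h.symm]
    · have hd : d ≠ c := fun e => h e.symm
      simp [pvOccs, h, hd, pvGo_occs c l (i + 1)]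

lemma pvOccs_bounds (c : Char) : ∀ (l : List Char) (k : Nat) (x : Int),
    x ∈ pvOccs c l k → (k : Int) ≤ x ∧ x < (k : Int) + l.length
  | [], _, _, hx => by simp [pvOccs] at hx
  | d :: l, k, x, hx => by
    by_cases h : d = c
    · simp [pvOccs, h] at hx
      rcases hx with rfl | hx
      · simp only [List.length_cons]; push_cast; omega
      · have := pvOccs_bounds c l (k + 1) x hx
        simp only [List.length_cons] at this ⊢; push_cast at this ⊢; omega
    · simp [pvOccs, h] at hx
      have := pvOccs_bounds c l (k + 1) x hx
      simp only [List.length_cons] at this ⊢; push_cast at this ⊢; omega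

lemma pvOccs_sorted (c : Char) : ∀ (l : List Char) (k : Nat),
    (pvOccs c l k).Pairwise (· < ·)
  | [], _ => by simp [pvOccs]
  | d :: l, k => by
    by_cases h : d = c
    · simp only [pvOccs, if_pos h]
      refine List.pairwise_cons.2 ⟨fun x hx => ?_, pvOccs_sorted c l (k + 1)⟩
      have := (pvOccs_bounds c l (k + 1) x hx).1
      push_cast at this; omega
    · simpa [pvOccs, h] using pvOccs_sorted c l (k + 1)

lemma pvOccs_shift (c : Char) : ∀ (l : List Char) (a b : Nat),
    pvOccs c l (a + b) = (pvOccs c l a).map (· + (b : Int))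
  | [], _, _ => by simp [pvOccs]
  | d :: l, a, b => by
    by_cases h : d = c
    · have ih := pvOccs_shift c l (a + 1) b
      have heq : a + 1 + b = a + b + 1 := by omega
      simp only [pvOccs, if_pos h, List.map_cons]
      rw [← heq, ih]
      congr 1
    · have ih := pvOccs_shift c l (a + 1) b
      have heq : a + 1 + b = a + b + 1 := by omega
      simp only [pvOccs, if_neg h]
      rw [← heq, ih]

-- filtering the full positions list by (k ≤ ·) is the positions list of the dropped tail
lemma pvOccs_filter_drop (c : Char) : ∀ (k : Nat) (l : List Char), k ≤ l.length →
    (pvOccs c l 0).filter (fun x => decide ((k : Int) ≤ x)) = pvOccs c (l.drop k) k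
  | 0, l, _ => by
    rw [List.drop_zero]
    apply List.filter_eq_self.2
    intro x hx
    have := (pvOccs_bounds c l 0 x hx).1
    simpa using this
  | (k + 1), [], h => by simp at h
  | (k + 1), d :: l, h => by
    have hk : k ≤ l.length := by simpa using h
    have ih := pvOccs_filter_drop c k l hk
    have hshift : pvOccs c (l.drop k) (k + 1) = (pvOccs c (l.drop k) k).map (· + (1 : Int)) := by
      simpa using pvOccs_shift c (l.drop k) k 1
    have hshift0 : pvOccs c l 1 = (pvOccs c l 0).map (· + (1 : Int)) := by
      simpa using pvOccs_shift c l 0 1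
    have hmapfilter :
        ((pvOccs c l 0).map (· + (1 : Int))).filter (fun x => decide ((((k + 1 : Nat)) : Int) ≤ x))
          = ((pvOccs c l 0).filter (fun x => decide ((k : Int) ≤ x))).map (· + (1 : Int)) := by
      rw [List.filter_map]
      congr 1
      apply List.filter_congr
      intro x _
      simp only [Function.comp_apply, decide_eq_decide]
      push_cast
      omega
    by_cases hd : d = c
    · simp only [pvOccs, if_pos hd, List.drop_succ_cons]
      rw [List.filter_cons_of_neg (by simp only [decide_eq_true_eq]; push_cast; omega)]
      rw [hshift0, hmapfilter, ih, ← hshift]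
    · simp only [pvOccs, if_neg hd, List.drop_succ_cons]
      rw [hshift0, hmapfilter, ih, ← hshift]

-- the dict built by the fold stores exactly the positions lists
lemma pvEnum_occs (c : Char) : ∀ (l : List Char) (s : Nat),
    ((((PySem.List.enumerate l (s : Int))).map Prod.swap).filter (fun p => p.1 == c)).map (·.2)
      = pvOccs c l s
  | [], _ => by simp [PySem.List.enumerate_nil, pvOccs]
  | d :: l, s => by
    have ih := pvEnum_occs c l (s + 1)
    rw [PySem.List.enumerate_cons]
    by_cases h : d = c
    · simp only [List.map_cons, Prod.swap_prod_mk, List.filter_cons, pvOccs, beq_iff_eq, if_pos h]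
      push_cast at ih ⊢
      simp [ih]
    · simp only [List.map_cons, Prod.swap_prod_mk, List.filter_cons, pvOccs, if_neg h]
      push_cast at ih ⊢
      simp [h, ih]

lemma pvPositions_getD (comb : List Char) (c : Char) :
    (pvPositions comb).getD c [] = pvOccs c comb 0 := by
  unfold pvPositions pvBuildStep
  rw [show ((PySem.List.enumerate comb 0).foldl (fun d p => d.modify p.2 [] (· ++ [p.1])) PySem.Dict.empty)
        = (((PySem.List.enumerate comb 0).map Prod.swap).foldl
            (fun d p => d.modify p.1 [] (· ++ [p.2])) PySem.Dict.empty) from by rw [List.foldl_map]; rfl]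
  rw [PySem.Dict.getD_foldl_modify_append]
  rw [PySem.Dict.getD_empty, List.nil_append]
  exact_mod_cast pvEnum_occs c comb 0

lemma pvSorted_getD (idx : List Int) (hs : idx.Pairwise (· < ·)) {m m' : Nat}
    (hmm : m < m') (hm' : m' < idx.length) : idx.getD m 0 < idx.getD m' 0 := by
  rw [List.getD_eq_getElem idx 0 (by omega), List.getD_eq_getElem idx 0 hm']
  exact List.pairwise_iff_getElem.1 hs m m' (by omega) hm' hmm

lemma pvBSearch_spec (idx : List Int) (need : Int) (hs : idx.Pairwise (· < ·)) :
    ∀ (lo hi : Nat), lo ≤ hi → hi ≤ idx.length →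
    (∀ m, m < lo → idx.getD m 0 < need) →
    (∀ m, hi ≤ m → m < idx.length → need ≤ idx.getD m 0) →
    lo ≤ pvBSearch idx need lo hi ∧ pvBSearch idx need lo hi ≤ hi ∧
    (∀ m, m < pvBSearch idx need lo hi → idx.getD m 0 < need) ∧
    (∀ m, pvBSearch idx need lo hi ≤ m → m < idx.length → need ≤ idx.getD m 0) := by
  intro lo hi
  induction lo, hi using pvBSearch.induct idx need with
  | case1 lo hi h mid hlt ih =>
    intro _ hhi hbelow habove
    have hmdef : mid = (lo + hi) / 2 := rfl
    clear_value mid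
    subst hmdef
    rw [pvBSearch]
    simp only [dif_pos h]
    rw [if_pos hlt]
    have hb : ∀ m, m < (lo + hi) / 2 + 1 → idx.getD m 0 < need := by
      intro m hm
      rcases lt_or_ge m lo with h1 | h1
      · exact hbelow m h1
      · rcases eq_or_lt_of_le (Nat.lt_succ_iff.1 hm) with rfl | h2
        · exact hlt
        · exact lt_trans (pvSorted_getD idx hs h2 (by omega)) hlt
    have := ih (by omega) hhi hb habove
    refine ⟨by omega, this.2.1, this.2.2.1, this.2.2.2⟩
  | case2 lo hi h mid hge ih =>
    intro hlo hhi hbelow habove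
    have hmdef : mid = (lo + hi) / 2 := rfl
    clear_value mid
    subst hmdef
    rw [pvBSearch]
    simp only [dif_pos h]
    rw [if_neg hge]
    have ha : ∀ m, (lo + hi) / 2 ≤ m → m < idx.length → need ≤ idx.getD m 0 := by
      intro m h1 h2
      rcases eq_or_lt_of_le h1 with rfl | h3
      · omega
      · exact le_of_lt (lt_of_le_of_lt (by omega) (pvSorted_getD idx hs h3 h2))
    have := ih (by omega) (by omega) hbelow ha
    exact ⟨this.1, by omega, this.2.2.1, this.2.2.2⟩
  | case3 lo hi h =>
    intro hlo hhi hbelow habove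
    have heq : lo = hi := by omega
    subst heq
    rw [pvBSearch]
    simp only [dif_neg h]
    exact ⟨le_refl _, le_refl _, hbelow, habove⟩

-- a sorted list whose first r elements fail p and rest satisfy it filters to its drop
lemma pvFilter_eq_drop (p : Int → Bool) : ∀ (l : List Int) (r : Nat), r ≤ l.length →
    (∀ m, m < r → p (l.getD m 0) = false) →
    (∀ m, r ≤ m → m < l.length → p (l.getD m 0) = true) →
    l.filter p = l.drop r
  | l, 0, _, _, hall => by
    rw [List.drop_zero, List.filter_eq_self.2]
    intro x hx
    rcases List.getElem_of_mem hx with ⟨m, hm, rfl⟩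
    have := hall m (Nat.zero_le _) hm
    rwa [List.getD_eq_getElem l 0 hm] at this
  | [], r + 1, h, _, _ => by simp at h
  | x :: l, r + 1, h, hlo, hhi => by
    have h0 := hlo 0 (Nat.succ_pos _)
    simp at h0
    rw [List.filter_cons_of_neg (by simp [h0]), List.drop_succ_cons]
    refine pvFilter_eq_drop p l r (by simpa using h) ?_ ?_
    · intro m hm; simpa using hlo (m + 1) (by omega)
    · intro m h1 h2; simpa using hhi (m + 1) (by omega) (by simpa using h2)

-- the main loop invariant: A's search index + 1 equals B's cursor `need` (= k)
lemma pvKey (comb : List Char) : ∀ (ws : List Char) (k : Nat), k ≤ comb.length →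
    pvALoop comb ws ((k : Int) - 1) = pvBLoop (pvPositions comb) ws (k : Int)
  | [], k, _ => by simp [pvALoop, pvBLoop]
  | c :: ws, k, hk => by
    have hstep : ((k : Int) - 1) + 1 = (k : Int) := by ring
    have hff := PySem.Chars.findFrom_natCast comb [c] k hk
    have hfind : PySem.Chars.find (comb.drop k) [c] = (pvOccs c (comb.drop k) 0).headD (-1) := by
      simpa [PySem.Chars.find] using pvGo_occs c (comb.drop k) 0
    set idx := (pvPositions comb).getD c [] with hidx
    have hidxo : idx = pvOccs c comb 0 := pvPositions_getD comb c
    have hs : idx.Pairwise (· < ·) := by rw [hidxo]; exact pvOccs_sorted c comb 0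
    have hbs := pvBSearch_spec idx ((k : Int)) hs 0 idx.length (Nat.zero_le _) (le_refl _)
      (by intro m hm; omega) (by intro m h1 h2; omega)
    set r := pvBSearch idx (k : Int) 0 idx.length with hr
    have hfilter : idx.filter (fun x => decide ((k : Int) ≤ x)) = idx.drop r := by
      refine pvFilter_eq_drop _ idx r hbs.2.1 ?_ ?_
      · intro m hm
        simp only [decide_eq_false_iff_not, not_le]
        exact hbs.2.2.1 m hm
      · intro m h1 h2
        simp only [decide_eq_true_eq]
        exact hbs.2.2.2 m h1 h2
    have hdropocc : idx.filter (fun x => decide ((k : Int) ≤ x)) = pvOccs c (comb.drop k) k := by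
      rw [hidxo]; exact pvOccs_filter_drop c k comb hk
    have hshift : pvOccs c (comb.drop k) k = (pvOccs c (comb.drop k) 0).map (· + (k : Int)) := by
      simpa using pvOccs_shift c (comb.drop k) 0 k
    by_cases hG : pvOccs c (comb.drop k) 0 = []
    · -- character not found from k on: both return False
      have hfneg : PySem.Chars.find (comb.drop k) [c] = -1 := by rw [hfind, hG]; rfl
      have hdropnil : idx.drop r = [] := by
        rw [← hfilter, hdropocc, hshift, hG]; rfl
      have hrlen : r = idx.length := by
        have := List.drop_eq_nil_iff.1 hdropnil
        omega
      simp only [pvALoop, pvBLoop, hstep, hff, hfneg, ← hidx, ← hr, hrlen]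
      simp
    · -- found: A's new index is k + j, B reads idx[r] = k + j
      obtain ⟨j, G, hGj⟩ := List.exists_cons_of_ne_nil hG
      have hjbound := pvOccs_bounds c (comb.drop k) 0 j (by rw [hGj]; exact List.mem_cons_self ..)
      have hjnn : 0 ≤ j := by simpa using hjbound.1
      have hjlt : j < ((comb.drop k).length : Int) := by
        have := hjbound.2; simpa using this
      have hfpos : PySem.Chars.find (comb.drop k) [c] = j := by rw [hfind, hGj]; rfl
      have hfne : PySem.Chars.find (comb.drop k) [c] ≠ -1 := by rw [hfpos]; omega
      have hdropidx : idx.drop r = (j + (k : Int)) :: G.map (· + (k : Int)) := by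
        rw [← hfilter, hdropocc, hshift, hGj, List.map_cons]
      have hrlt : r < idx.length := by
        by_contra hcon
        have : idx.drop r = [] := List.drop_eq_nil_iff.2 (by omega)
        rw [hdropidx] at this; exact List.cons_ne_nil _ _ this
      have hget : idx.getD r 0 = j + (k : Int) := by
        have h1 : (idx.drop r).getD 0 0 = idx.getD r 0 := by
          rw [List.getD_eq_getElem _ 0 (by simpa using hrlt), List.getD_eq_getElem _ 0 hrlt]
          simp
        rw [← h1, hdropidx]; rfl
      have hlen : k + j.toNat + 1 ≤ comb.length := by
        have hdl : (comb.drop k).length = comb.length - k := List.length_drop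
        omega
      have ih := pvKey comb ws (k + j.toNat + 1) hlen
      have hcast : ((k + j.toNat + 1 : Nat) : Int) - 1 = (k : Int) + j := by
        push_cast [Int.toNat_of_nonneg hjnn]; ring
      have hcast2 : ((k + j.toNat + 1 : Nat) : Int) = j + (k : Int) + 1 := by
        push_cast [Int.toNat_of_nonneg hjnn]; ring
      rw [hcast, hcast2] at ih
      have hifne : ¬ ((k : Int) + j = -1) := by omega
      have hjne : ¬ (j = -1) := by omega
      simp only [pvALoop, pvBLoop, hstep, hff, hfpos, hjne, hifne, if_false, ← hidx, ← hr,
        if_neg (by omega : ¬ r = idx.length), hget]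
      exact ih

-- ===== VERDICT (by name: the statement is the Claim_ definition above) =====
theorem are_characters_hidden_spec : Claim_equal_are_characters_hidden := by
  intro word combination _
  unfold Spec_are_characters_hidden are_characters_hidden are_characters_hidden_alt
  have := pvKey (PySem.Chars.lower combination.toList) (PySem.Chars.lower word.toList) 0 (Nat.zero_le _)
  simpa using this
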